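-- pv_equiv track=rewrite | github.com/Charles-Gahide/programing-1 | 10-dictionaries/04-assignment-desktop/student.py | desktop
-- ===== SOURCE A (Python) =====
-- def desktop(catalog, components):
--
--     total_price=0
--
--     for item in components:
--         if item in catalog:
--             total_price+=catalog[item]
--         else:
--             raise ValueError("not in list hoe")
--     return total_price
-- ===== SOURCE B (Python) =====
-- def desktop(catalog, components):
--     comps = list(components)
--     missing = set(comps) - set(catalog)
--     if missing:
--         raise ValueError("not in list hoe")
--     return sum(catalog[item] for item in comps)
-- ===== Notes on version B (the rewrite author's own statement) =====
-- stated objective: simpler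
-- what changed: B separates validation from accumulation: it computes the set difference components - catalog keys up front, raises once if non-empty, and otherwise returns a single sum() over lookups, instead of A's fused loop that interleaves the membership test with accumulation.
import Mathlib
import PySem

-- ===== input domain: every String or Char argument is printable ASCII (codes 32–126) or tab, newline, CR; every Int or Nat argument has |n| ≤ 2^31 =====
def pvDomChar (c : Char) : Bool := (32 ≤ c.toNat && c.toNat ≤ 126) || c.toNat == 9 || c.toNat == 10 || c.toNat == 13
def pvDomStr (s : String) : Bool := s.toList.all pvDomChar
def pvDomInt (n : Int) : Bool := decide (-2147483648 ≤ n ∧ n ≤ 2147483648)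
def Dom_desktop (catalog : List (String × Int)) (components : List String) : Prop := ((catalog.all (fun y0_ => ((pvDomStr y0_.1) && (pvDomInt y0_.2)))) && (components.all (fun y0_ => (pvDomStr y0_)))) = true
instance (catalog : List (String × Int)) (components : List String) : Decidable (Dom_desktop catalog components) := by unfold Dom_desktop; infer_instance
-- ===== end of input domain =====

-- B separates validation (set difference of components against catalog keys, raise if non-empty)
-- from accumulation (one sum over lookups); objective: simpler. Both raise ValueError on a missing
-- component, so those inputs are outside Pre_.

-- ===== PORT A =====
-- A's fused loop: the raise is modelled by an Option accumulator (none = ValueError raised),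
-- which Pre_ excludes.
def desktop (catalog : List (String × Int)) (components : List String) : Int :=
  (components.foldl
    (fun acc item =>
      match acc with
      | none => none
      | some total_price =>
        if ((PySem.Dict.mk catalog).get? item).isSome then
          some (total_price + (PySem.Dict.mk catalog).getD item 0)
        else none)
    (some (0 : Int))).getD 0

-- ===== PORT B =====
-- Source B: missing = set(comps) - set(catalog); raise if non-empty (outside Pre_), else sum().
def desktop_alt (catalog : List (String × Int)) (components : List String) : Int :=
  let missing := PySem.Set.diff (PySem.Set.ofList components) ((PySem.Dict.mk catalog).keys)
  if missing ≠ [] then 0   -- raise ValueError("not in list hoe"): unreachable under Pre_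
  else (components.map (fun item => (PySem.Dict.mk catalog).getD item 0)).sum

-- ===== PRECONDITION & SPEC =====
-- Pre_ excludes exactly the inputs on which A (and B) raise ValueError: some component is not a catalog key.
def Pre_desktop (catalog : List (String × Int)) (components : List String) : Prop :=
  components.all (fun c => ((PySem.Dict.mk catalog).get? c).isSome) = true
instance (catalog : List (String × Int)) (components : List String) : Decidable (Pre_desktop catalog components) := by unfold Pre_desktop; infer_instance

def pvWitness_desktop : (List (String × Int)) × List String :=
  ([("cpu", 120), ("ram", 40)], ["cpu", "ram", "cpu"])

def Spec_desktop (catalog : List (String × Int)) (components : List String) (out : Int) : Prop := out = desktop_alt catalog components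
instance (catalog : List (String × Int)) (components : List String) (out : Int) : Decidable (Spec_desktop catalog components out) := by unfold Spec_desktop; infer_instance

-- ===== CLAIM (what is proved, stated in full; the proofs are below) =====
def Claim_equal_desktop : Prop := ∀ (catalog : List (String × Int)) (components : List String), Dom_desktop catalog components → Pre_desktop catalog components → Spec_desktop catalog components (desktop catalog components)

-- ===== LEMMAS AND PROOFS =====

-- A's loop, started at `some t` with every item present, returns `some (t + Σ lookups)`.
theorem desktop_loop_eq (catalog : List (String × Int)) :
    ∀ (comps : List String) (t : Int),
      (∀ c ∈ comps, ((PySem.Dict.mk catalog).get? c).isSome) →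
      comps.foldl
        (fun acc item =>
          match acc with
          | none => none
          | some total_price =>
            if ((PySem.Dict.mk catalog).get? item).isSome then
              some (total_price + (PySem.Dict.mk catalog).getD item 0)
            else none)
        (some t)
      = some (t + (comps.map (fun item => (PySem.Dict.mk catalog).getD item 0)).sum) := by
  intro comps
  induction comps with
  | nil => intro t _; simp
  | cons c cs ih =>
    intro t h
    have hc : ((PySem.Dict.mk catalog).get? c).isSome := h c (List.mem_cons_self ..)
    simp only [List.foldl_cons, hc, if_pos]
    rw [ih _ (fun x hx => h x (List.mem_cons_of_mem _ hx))]
    simp [add_assoc]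

-- Under Pre_, B's `missing` set is empty.
theorem desktop_missing_nil (catalog : List (String × Int)) (components : List String)
    (h : Pre_desktop catalog components) :
    PySem.Set.diff (PySem.Set.ofList components) ((PySem.Dict.mk catalog).keys) = [] := by
  unfold Pre_desktop at h
  rw [List.all_eq_true] at h
  simp only [PySem.Set.diff, List.filter_eq_nil_iff]
  intro x hx
  have hx' : x ∈ components := (PySem.Set.mem_ofList ..).mp hx
  have := h x hx'
  obtain ⟨v, hv⟩ := Option.isSome_iff_exists.mp this
  have hmem : (x, v) ∈ (PySem.Dict.mk catalog).items := PySem.Dict.mem_items_of_get?_eq_some _ hv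
  simp [PySem.Set.contains]
  exact ⟨v, hmem⟩

-- ===== VERDICT (by name: the statement is the Claim_ definition above) =====
theorem desktop_spec : Claim_equal_desktop := by
  intro catalog components _ hpre
  unfold Spec_desktop desktop desktop_alt
  rw [desktop_loop_eq catalog components 0 (by
    intro c hc
    unfold Pre_desktop at hpre
    rw [List.all_eq_true] at hpre
    simpa using hpre c hc)]
  rw [desktop_missing_nil catalog components hpre]
  simp
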